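-- pv_equiv track=rewrite | github.com/jchy20/how-much-backtrack | reasoning-gym/reasoning_gym/arc/arc_1d_tasks.py | transform_sort_complete_sequence
-- ===== SOURCE A (Python) =====
-- def transform_sort_complete_sequence(input_grid: list[int]) -> list[int]:
--     size = len(input_grid)
--     # 1. Detect the block color (first non-zero)
--     block_color = next((v for v in input_grid if v != 0), None)
--     if block_color is None:
--         return input_grid.copy()
--
--     # 2. Extract all block sizes in left-to-right order
--     runs = []
--     i = 0
--     while i < size:
--         if input_grid[i] == block_color:
--             start = i
--             while i < size and input_grid[i] == block_color:
--                 i += 1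
--             runs.append(i - start)
--         else:
--             i += 1
--
--     # If fewer than two blocks, nothing to do
--     if len(runs) < 2:
--         return input_grid.copy()
--
--     # 3. Sort the sizes ascending
--     runs_sorted = sorted(runs)
--
--     # 4. Build the output grid
--     output = [0] * size
--     pos = 0
--     for block_size in runs_sorted:
--         # place block
--         for offset in range(block_size):
--             output[pos + offset] = block_color
--         # advance past block + one-gap
--         pos += block_size + 1
--         if pos >= size:
--             break
--
--     return output
-- ===== SOURCE B (Python) =====
-- def transform_sort_complete_sequence(input_grid: list[int]) -> list[int]:
--     size = len(input_grid)
--     block_color = next((v for v in input_grid if v != 0), None)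
--     if block_color is None:
--         return input_grid.copy()
--
--     # Counting-sort approach: build a histogram of run lengths in one sweep
--     # (a sentinel 0 appended flushes the last run), never materialising or
--     # comparison-sorting a runs list.
--     freq = [0] * (size + 1)
--     nruns = 0
--     cur = 0
--     for v in input_grid + [0]:
--         if v == block_color:
--             cur += 1
--         elif cur:
--             freq[cur] += 1
--             nruns += 1
--             cur = 0
--
--     if nruns < 2:
--         return input_grid.copy()
--
--     # Emit blocks in increasing length straight from the histogram.
--     out = []
--     for length in range(1, size + 1):
--         out += ([block_color] * length + [0]) * freq[length]
--     return (out + [0] * size)[:size]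
-- ===== Notes on version B (the rewrite author's own statement) =====
-- stated objective: alternative
-- what changed: B never builds or comparison-sorts a runs list: one sweep (with an appended sentinel 0) fills a histogram freq[length] of run lengths, and the output is emitted by counting sort, concatenating ([color]*length+[0])*freq[length] for length = 1..size and slicing to size, instead of A's sorted() plus positional write loop with a break.
import Mathlib
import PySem

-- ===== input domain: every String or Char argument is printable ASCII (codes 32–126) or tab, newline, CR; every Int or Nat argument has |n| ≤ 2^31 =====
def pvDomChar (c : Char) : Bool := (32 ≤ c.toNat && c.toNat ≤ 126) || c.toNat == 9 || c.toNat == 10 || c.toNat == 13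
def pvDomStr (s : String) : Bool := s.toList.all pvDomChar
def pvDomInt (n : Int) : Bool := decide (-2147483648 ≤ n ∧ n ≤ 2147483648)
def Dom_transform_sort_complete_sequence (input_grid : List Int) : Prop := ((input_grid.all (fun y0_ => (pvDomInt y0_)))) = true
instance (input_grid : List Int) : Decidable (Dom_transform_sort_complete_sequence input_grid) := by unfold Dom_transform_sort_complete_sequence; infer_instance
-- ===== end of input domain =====

-- B replaces A's comparison sort and positional write loop by a counting sort: one sweep
-- (with a sentinel) builds a histogram of run lengths, and the output is emitted by
-- concatenating blocks per length in increasing order (objective: alternative).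

-- ===== PORT A =====
-- inner `while i < size and input_grid[i] == block_color: i += 1`, returning the run length
-- and the remaining suffix of the grid
def pvCountRun (c : Int) : List Int → Nat × List Int
  | [] => (0, [])
  | x :: xs => if x = c then ((pvCountRun c xs).1 + 1, (pvCountRun c xs).2) else (0, x :: xs)

theorem pvCountRun_snd_le (c : Int) (xs : List Int) : (pvCountRun c xs).2.length ≤ xs.length := by
  induction xs with
  | nil => simp [pvCountRun]
  | cons x xs ih =>
    simp only [pvCountRun]
    split
    · exact Nat.le_succ_of_le ih
    · simp

-- A's outer while-loop collecting `runs`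
def pvRunsA (c : Int) : List Int → List Nat
  | [] => []
  | x :: xs =>
    if x = c then ((pvCountRun c xs).1 + 1) :: pvRunsA c (pvCountRun c xs).2
    else pvRunsA c xs
termination_by l => l.length
decreasing_by
  · exact Nat.lt_succ_of_le (pvCountRun_snd_le c xs)
  · simp

-- `for offset in range(block_size): output[pos + offset] = block_color`
def pvWriteRun (c : Int) (pos : Nat) (r : Nat) (out : List Int) : List Int :=
  (List.range r).foldl (fun o off => o.set (pos + off) c) out

-- A's placement loop with the early `break` once pos >= size
def pvPlace (c : Int) (size : Nat) : List Nat → List Int → Nat → List Int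
  | [], out, _ => out
  | r :: rs, out, pos =>
    let out' := pvWriteRun c pos r out
    let pos' := pos + r + 1
    if size ≤ pos' then out' else pvPlace c size rs out' pos'

def transform_sort_complete_sequence (input_grid : List Int) : List Int :=
  let size := input_grid.length
  match input_grid.find? (fun v => v ≠ 0) with
  | none => input_grid
  | some c =>
    let runs := pvRunsA c input_grid
    if runs.length < 2 then input_grid
    else pvPlace c size (PySem.List.sorted runs (fun x => x) false) (List.replicate size 0) 0

-- ===== PORT B =====
-- loop body of B's single sweep: `cur += 1` on the block color, flush `freq[cur] += 1;
-- nruns += 1; cur = 0` on anything else (state = (freq, nruns, cur));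
-- `freq[cur]` is always in range (cur ≤ size), so pyGetD is exact here
def pvHistStep (c : Int) (s : List Int × Nat × Nat) (v : Int) : List Int × Nat × Nat :=
  if v = c then (s.1, s.2.1, s.2.2 + 1)
  else if s.2.2 ≠ 0 then
    (s.1.set s.2.2 (PySem.List.pyGetD s.1 (s.2.2 : Int) 0 + 1), s.2.1 + 1, 0)
  else s

-- `for length in range(1, size+1): out += ([c]*length + [0]) * freq[length]`
def pvEmit (c : Int) (freq : List Int) (size : Nat) : List Int :=
  (PySem.List.pyRange 1 ((size : Int) + 1)).foldl
    (fun out L =>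
      out ++ PySem.List.pyRepeat (PySem.List.pyRepeat [c] L ++ [0])
        (PySem.List.pyGetD freq L 0)) []

def transform_sort_complete_sequence_alt (input_grid : List Int) : List Int :=
  let size := input_grid.length
  match input_grid.find? (fun v => v ≠ 0) with
  | none => input_grid
  | some c =>
    -- `for v in input_grid + [0]: …` with state (freq, nruns, cur)
    let s := (input_grid ++ [0]).foldl (pvHistStep c) (List.replicate (size + 1) 0, 0, 0)
    if s.2.1 < 2 then input_grid
    else PySem.List.slice (pvEmit c s.1 size ++ List.replicate size 0) none (some (size : Int))

-- ===== PRECONDITION & SPEC =====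
def Spec_transform_sort_complete_sequence (input_grid : List Int) (out : List Int) : Prop := out = transform_sort_complete_sequence_alt input_grid
instance (input_grid : List Int) (out : List Int) : Decidable (Spec_transform_sort_complete_sequence input_grid out) := by unfold Spec_transform_sort_complete_sequence; infer_instance

-- ===== CLAIM (what is proved, stated in full; the proofs are below) =====
def Claim_equal_transform_sort_complete_sequence : Prop := ∀ (input_grid : List Int), Dom_transform_sort_complete_sequence input_grid → Spec_transform_sort_complete_sequence input_grid (transform_sort_complete_sequence input_grid)

-- ===== LEMMAS AND PROOFS =====

-- proof-side helpers ------------------------------------------------------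

-- one flush: freq[r] += 1
def pvApplyRun (F : List Int) (r : Nat) : List Int :=
  F.set r (PySem.List.pyGetD F (r : Int) 0 + 1)

def pvApplyRuns (F : List Int) (rs : List Nat) : List Int := rs.foldl pvApplyRun F

-- the block A emits for one run, and A's concatenated layout
def pvConcatB (c : Int) (rs : List Nat) : List Int :=
  rs.foldl (fun acc r => acc ++ (List.replicate r c ++ [0])) []

theorem pvConcatB_eq_flatMap (c : Int) (rs : List Nat) :
    pvConcatB c rs = rs.flatMap (fun r => List.replicate r c ++ [0]) := by
  simpa [pvConcatB] using PySem.List.foldl_append_eq_flatMap (fun r => List.replicate r c ++ [(0:Int)]) rs []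

-- A-side facts ------------------------------------------------------------

theorem pvCountRun_spec (c : Int) (xs : List Int) :
    (pvCountRun c xs).1 + (pvCountRun c xs).2.length = xs.length ∧
    (∀ y ∈ (pvCountRun c xs).2.head?, y ≠ c) := by
  induction xs with
  | nil => simp [pvCountRun]
  | cons x xs ih =>
    by_cases hx : x = c
    · simp only [pvCountRun, if_pos hx]
      refine ⟨?_, ih.2⟩
      have h1 := ih.1
      simp only [List.length_cons]
      omega
    · simp only [pvCountRun, if_neg hx]
      refine ⟨by simp, ?_⟩
      intro y hy
      simp only [List.head?_cons, Option.mem_some_iff] at hy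
      subst hy
      exact hx

theorem pvRunsA_pos (c : Int) (g : List Int) : ∀ r ∈ pvRunsA c g, 0 < r := by
  induction g using pvRunsA.induct c with
  | case1 => simp [pvRunsA]
  | case2 xs ih =>
    rw [pvRunsA, if_pos rfl]
    intro r hr
    rcases List.mem_cons.mp hr with h | h
    · omega
    · exact ih r h
  | case3 x xs hx ih =>
    rw [pvRunsA, if_neg hx]
    exact ih

theorem pvRunsA_cons_ne (c x : Int) (xs : List Int) (hx : ¬ x = c) :
    pvRunsA c (x :: xs) = pvRunsA c xs := by
  rw [pvRunsA, if_neg hx]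

theorem pvRunsA_bound_aux (c : Int) : ∀ (n : Nat) (g : List Int), g.length ≤ n →
    (pvRunsA c g).sum + (pvRunsA c g).length ≤ g.length + 1 := by
  intro n
  induction n with
  | zero =>
    intro g hg
    match g with
    | [] => simp [pvRunsA]
    | x :: xs => simp at hg
  | succ n ihn =>
    intro g hg
    match g with
    | [] => simp [pvRunsA]
    | x :: xs =>
      by_cases hx : x = c
      · subst hx
        rw [pvRunsA, if_pos rfl]
        have hlen := (pvCountRun_spec x xs).1
        have hhd := (pvCountRun_spec x xs).2
        cases hrest : (pvCountRun x xs).2 with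
        | nil =>
          rw [hrest] at hlen
          simp only [pvRunsA, List.sum_cons, List.sum_nil, List.length_cons, List.length_nil,
            List.length_nil] at *
          omega
        | cons y ys =>
          have hy : y ≠ x := by
            have := hhd y; rw [hrest] at this; simpa using this
          rw [hrest] at hlen
          rw [pvRunsA_cons_ne x y ys hy]
          simp only [List.length_cons] at hlen hg
          have hb := ihn ys (by omega)
          simp only [List.sum_cons, List.length_cons]
          omega
      · rw [pvRunsA_cons_ne c x xs hx]
        simp only [List.length_cons] at hg
        have hb := ihn xs (by omega)
        simp only [List.length_cons]
        omega

theorem pvRunsA_bound (c : Int) (g : List Int) :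
    (pvRunsA c g).sum + (pvRunsA c g).length ≤ g.length + 1 :=
  pvRunsA_bound_aux c g.length g (Nat.le_refl _)

-- each run length is at most the grid length
theorem pvRunsA_le (c : Int) (g : List Int) : ∀ r ∈ pvRunsA c g, r ≤ g.length := by
  intro r hr
  have hb := pvRunsA_bound c g
  have hlen : 1 ≤ (pvRunsA c g).length := List.length_pos_of_mem hr
  have hsum : r ≤ (pvRunsA c g).sum :=
    List.single_le_sum (fun x _ => Nat.zero_le x) r hr
  omega

-- A's write loop on `done ++ zeros` produces `done ++ block ++ zeros`
theorem pvWriteRun_eq (c : Int) (done : List Int) (pos r m : Nat)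
    (hd : done.length = pos) (hr : r ≤ m) :
    pvWriteRun c pos r (done ++ List.replicate m 0) =
      done ++ List.replicate r c ++ List.replicate (m - r) 0 := by
  induction r with
  | zero => simp [pvWriteRun]
  | succ n ih =>
    have hn : n ≤ m := Nat.le_of_succ_le hr
    have hprev := ih hn
    unfold pvWriteRun at hprev ⊢
    rw [List.range_succ, List.foldl_append, hprev]
    simp only [List.foldl_cons, List.foldl_nil]
    rw [show m - n = (m - (n + 1)) + 1 by omega, List.replicate_succ]
    rw [List.set_append_right _ _ (by simp [hd])]
    rw [show pos + n - (done ++ List.replicate n c).length = 0 by simp [hd]]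
    rw [List.set_cons_zero]
    rw [List.append_assoc, List.append_assoc]
    congr 1
    rw [List.replicate_succ', List.append_assoc]
    rfl

theorem pvPlace_eq (c : Int) (size : Nat) : ∀ (rs : List Nat) (done : List Int) (pos : Nat),
    (∀ r ∈ rs, 0 < r) → rs.sum + rs.length + pos ≤ size + 1 → pos ≤ size →
    done.length = pos →
    pvPlace c size rs (done ++ List.replicate (size - pos) 0) pos =
      (done ++ pvConcatB c rs ++ List.replicate size 0).take size := by
  intro rs
  induction rs with
  | nil =>
    intro done pos _ _ hpos hd
    simp only [pvPlace, pvConcatB, List.foldl_nil, List.append_nil]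
    rw [List.take_append, List.take_of_length_le (by omega), List.take_replicate]
    congr 1
    rw [hd]
    congr 1
    omega
  | cons r rs ih =>
    intro done pos hpos hsum hple hd
    have hr0 : 0 < r := hpos r (List.mem_cons_self ..)
    have hrs : rs.sum + rs.length + (pos + r + 1) ≤ size + 1 := by
      simp only [List.sum_cons, List.length_cons] at hsum; omega
    have hprle : pos + r ≤ size := by
      simp only [List.sum_cons, List.length_cons] at hsum; omega
    have hwrite := pvWriteRun_eq c done pos r (size - pos) hd (by omega)
    have hmr : size - pos - r = size - (pos + r) := by omega
    rw [pvConcatB_eq_flatMap]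
    simp only [pvPlace, List.flatMap_cons]
    rw [hwrite, hmr]
    by_cases hrsnil : rs = []
    · subst hrsnil
      have goal : done ++ List.replicate r c ++ List.replicate (size - (pos + r)) 0 =
          (done ++ (List.replicate r c ++ [0] ++ List.flatMap (fun r => List.replicate r c ++ [0]) ([] : List Nat)) ++ List.replicate size 0).take size := by
        simp only [List.flatMap_nil, List.append_nil]
        have h1 : done ++ (List.replicate r c ++ [0]) ++ List.replicate size 0
            = (done ++ List.replicate r c) ++ List.replicate (size + 1) 0 := by
          simp [List.replicate_succ]
        rw [h1, List.take_append]
        have h2 : (done ++ List.replicate r c).length ≤ size := by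
          simp only [List.length_append, List.length_replicate, hd]
          omega
        have h3 : (done ++ List.replicate r c).length = pos + r := by
          simp [hd]
        rw [List.take_of_length_le h2, List.take_replicate, h3,
          show min (size - (pos + r)) (size + 1) = size - (pos + r) by omega]
      split
      · simpa [pvPlace] using goal
      · simpa [pvPlace] using goal
    · have hrs2 : 2 ≤ rs.sum + rs.length := by
        cases rs with
        | nil => exact absurd rfl hrsnil
        | cons a as =>
          have : 0 < a := hpos a (by simp)
          simp only [List.sum_cons, List.length_cons]
          omega
      have hnb : ¬ (size ≤ pos + r + 1) := by omega
      rw [if_neg hnb]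
      have hrep : List.replicate (size - (pos + r)) (0:Int) = 0 :: List.replicate (size - (pos + r + 1)) 0 := by
        rw [show size - (pos + r) = (size - (pos + r + 1)) + 1 by omega, List.replicate_succ]
      rw [hrep]
      have := ih (done ++ (List.replicate r c ++ [0])) (pos + r + 1)
        (fun x hx => hpos x (List.mem_cons_of_mem _ hx)) hrs (by omega)
        (by simp [hd]; try omega)
      rw [pvConcatB_eq_flatMap] at this
      rw [show done ++ List.replicate r c ++ (0 :: List.replicate (size - (pos + r + 1)) 0)
            = (done ++ (List.replicate r c ++ [0])) ++ List.replicate (size - (pos + r + 1)) 0 by simp]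
      rw [this]
      simp

-- B's sweep computes one histogram increment per run of pvRunsA ------------

theorem pvHist_foldl (c : Int) (hc : c ≠ 0) (g : List Int) :
    (∀ (F : List Int) (n : Nat),
      (g ++ [0]).foldl (pvHistStep c) (F, n, 0)
        = (pvApplyRuns F (pvRunsA c g), n + (pvRunsA c g).length, 0)) ∧
    (∀ (F : List Int) (n cnt : Nat),
      (g ++ [0]).foldl (pvHistStep c) (F, n, cnt + 1)
        = (pvApplyRuns F ((cnt + 1 + (pvCountRun c g).1) :: pvRunsA c (pvCountRun c g).2),
           n + ((cnt + 1 + (pvCountRun c g).1) :: pvRunsA c (pvCountRun c g).2).length, 0)) := by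
  have h0 : ∀ s : List Int × Nat × Nat, s.2.2 = 0 → pvHistStep c s 0 = s := by
    intro s hs
    simp [pvHistStep, (by omega : (0:Int) ≠ c ∨ True).elim, hs]
    intro h; exact absurd h.symm hc
  induction g with
  | nil =>
    constructor
    · intro F n
      simp only [List.nil_append, List.foldl_cons, List.foldl_nil]
      rw [h0 (F, n, 0) rfl]
      simp [pvRunsA, pvApplyRuns]
    · intro F n cnt
      simp only [List.nil_append, List.foldl_cons, List.foldl_nil]
      have hstep : pvHistStep c (F, n, cnt + 1) 0
          = (pvApplyRun F (cnt + 1), n + 1, 0) := by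
        simp [pvHistStep, pvApplyRun]
        intro h; exact absurd h.symm hc
      rw [hstep]
      simp [pvCountRun, pvRunsA, pvApplyRuns]
  | cons x xs ih =>
    constructor
    · intro F n
      by_cases hx : x = c
      · have hstep : pvHistStep c (F, n, 0) x = (F, n, 0 + 1) := by simp [pvHistStep, hx]
        simp only [List.cons_append, List.foldl_cons, hstep]
        rw [ih.2 F n 0]
        rw [pvRunsA, if_pos hx]
        simp [Nat.add_comm]
      · have hstep : pvHistStep c (F, n, 0) x = (F, n, 0) := by simp [pvHistStep, hx]
        simp only [List.cons_append, List.foldl_cons, hstep]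
        rw [ih.1 F n, pvRunsA_cons_ne c x xs hx]
    · intro F n cnt
      by_cases hx : x = c
      · have hstep : pvHistStep c (F, n, cnt + 1) x = (F, n, (cnt + 1) + 1) := by
          simp [pvHistStep, hx]
        simp only [List.cons_append, List.foldl_cons, hstep]
        rw [ih.2 F n (cnt + 1)]
        simp only [pvCountRun, if_pos hx]
        have : cnt + 1 + 1 + (pvCountRun c xs).1 = cnt + 1 + ((pvCountRun c xs).1 + 1) := by omega
        rw [this]
      · have hstep : pvHistStep c (F, n, cnt + 1) x
            = (pvApplyRun F (cnt + 1), n + 1, 0) := by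
          simp [pvHistStep, pvApplyRun, hx]
        simp only [List.cons_append, List.foldl_cons, hstep]
        rw [ih.1 (pvApplyRun F (cnt + 1)) (n + 1)]
        simp only [pvCountRun, if_neg hx]
        rw [pvRunsA_cons_ne c x xs hx]
        simp only [pvApplyRuns, List.foldl_cons, List.length_cons, Nat.add_zero,
          Prod.mk.injEq]
        exact ⟨trivial, by omega, trivial⟩

-- histogram lookups -------------------------------------------------------

theorem pvApplyRuns_getD (rs : List Nat) : ∀ (F : List Int) (k : Nat),
    (∀ r ∈ rs, r < F.length) → k < F.length →
    (pvApplyRuns F rs).getD k 0 = F.getD k 0 + (rs.count k : Int) := by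
  induction rs with
  | nil => intro F k _ _; simp [pvApplyRuns]
  | cons r rs ih =>
    intro F k hmem hk
    have hr : r < F.length := hmem r (List.mem_cons_self ..)
    have hlen : (pvApplyRun F r).length = F.length := by simp [pvApplyRun]
    have step : (pvApplyRun F r).getD k 0
        = F.getD k 0 + (if r = k then (1:Int) else 0) := by
      simp only [pvApplyRun, PySem.List.pyGetD_natCast, List.getD_eq_getElem?_getD]
      by_cases hrk : r = k
      · subst hrk
        rw [List.getElem?_set_self hr]
        simp
      · rw [List.getElem?_set_ne hrk]
        simp [hrk]
    simp only [pvApplyRuns, List.foldl_cons] at *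
    rw [ih (pvApplyRun F r) k (fun x hx => hlen ▸ hmem x (List.mem_cons_of_mem _ hx)) (hlen ▸ hk),
      step, List.count_cons]
    by_cases hrk : r = k
    · subst hrk
      simp only [BEq.rfl, if_true]
      push_cast
      ring
    · have hb : ¬ (r == k) = true := by simpa using hrk
      simp [hrk, hb]

-- counting-sort emission --------------------------------------------------

theorem pvPyRange_one (n : Nat) :
    PySem.List.pyRange 1 ((n : Int) + 1) = (List.range' 1 n).map (fun k : Nat => (k : Int)) := by
  induction n with
  | zero => rfl
  | succ m ih =>
    have h1 : (1:Int) ≤ (m : Int) + 1 := by omega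
    have : PySem.List.pyRange 1 (((m+1 : Nat) : Int) + 1)
        = PySem.List.pyRange 1 ((m : Int) + 1) ++ [(m : Int) + 1] := by
      have := PySem.List.pyRange_one_succ_right (a := 1) (b := (m : Int) + 1) h1
      rw [← this]
      norm_num
    rw [this, ih, List.range'_concat]
    simp only [List.map_append, List.map_cons, List.map_nil]
    congr 2
    push_cast
    ring

theorem pvFlatten_replicate {α : Type} (f : Nat → List α) (k m : Nat) :
    (List.replicate m (f k)).flatten = (List.replicate m k).flatMap f := by
  induction m with
  | zero => simp
  | succ m ih => simp [List.replicate_succ, ih]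

theorem pvSum_ite (x : Nat) (m : Nat → Nat) :
    ∀ (R : List Nat), R.Nodup →
    ((R.map (fun k => if k = x then m k else 0)).sum) = if x ∈ R then m x else 0 := by
  intro R
  induction R with
  | nil => simp
  | cons a R ih =>
    intro hnd
    rcases List.nodup_cons.mp hnd with ⟨ha, hnd'⟩
    simp only [List.map_cons, List.sum_cons, ih hnd', List.mem_cons]
    by_cases hax : a = x
    · subst hax
      simp [ha]
    · simp [hax, Ne.symm hax]

theorem pvCounting_perm (runs : List Nat) (size : Nat)
    (h1 : ∀ r ∈ runs, 1 ≤ r) (h2 : ∀ r ∈ runs, r ≤ size) :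
    ((List.range' 1 size).flatMap (fun k => List.replicate (runs.count k) k)).Perm runs := by
  rw [List.perm_iff_count]
  intro x
  rw [List.count_flatMap]
  have hmap : (List.range' 1 size).map (List.count x ∘ fun k => List.replicate (runs.count k) k)
      = (List.range' 1 size).map (fun k => if k = x then runs.count k else 0) := by
    apply List.map_congr_left
    intro k _
    simp only [Function.comp_apply, List.count_replicate]
    by_cases hkx : k = x
    · simp [hkx]
    · have : ¬ (k == x) = true := by simpa using hkx
      simp [hkx, this]
  rw [hmap, pvSum_ite x _ (List.range' 1 size) (List.nodup_range')]
  by_cases hx : x ∈ List.range' 1 size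
  · simp [hx]
  · have hxout : x ∉ runs := by
      intro hxr
      apply hx
      rw [List.mem_range'_1]
      exact ⟨h1 x hxr, by have := h2 x hxr; omega⟩
    simp [hx, List.count_eq_zero.mpr hxout]

theorem pvCounting_pairwise (m : Nat → Nat) :
    ∀ (R : List Nat), R.Pairwise (· ≤ ·) →
    ((R.flatMap (fun k => List.replicate (m k) k)).Pairwise (· ≤ ·)) := by
  intro R
  induction R with
  | nil => simp
  | cons a R ih =>
    intro hp
    rcases List.pairwise_cons.mp hp with ⟨hle, hp'⟩
    simp only [List.flatMap_cons]
    rw [List.pairwise_append]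
    refine ⟨List.pairwise_replicate.mpr (Or.inr (le_refl a)), ih hp', ?_⟩
    intro u hu v hv
    rcases List.mem_flatMap.mp hv with ⟨k, hk, hvk⟩
    rw [List.eq_of_mem_replicate hu, List.eq_of_mem_replicate hvk]
    exact hle k hk

-- the emitter equals A's concatenation over the comparison-sorted runs
theorem pvEmit_eq (c : Int) (g : List Int) :
    pvEmit c (pvApplyRuns (List.replicate (g.length + 1) 0) (pvRunsA c g)) g.length
      = pvConcatB c (PySem.List.sorted (pvRunsA c g) (fun x => x) false) := by
  set size := g.length with hsize
  set runs := pvRunsA c g with hruns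
  have hpos : ∀ r ∈ runs, 1 ≤ r := fun r hr => pvRunsA_pos c g r hr
  have hle : ∀ r ∈ runs, r ≤ size := fun r hr => pvRunsA_le c g r hr
  have hsorted : PySem.List.sorted runs (fun x => x) false
      = (List.range' 1 size).flatMap (fun k => List.replicate (runs.count k) k) :=
    PySem.List.sorted_id_eq_of_perm_of_pairwise runs _
      (pvCounting_perm runs size hpos hle)
      (pvCounting_pairwise _ _ ((List.pairwise_lt_range' 1).imp fun h => Nat.le_of_lt h))
  rw [pvConcatB_eq_flatMap, hsorted, List.flatMap_assoc]
  unfold pvEmit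
  rw [PySem.List.foldl_append_eq_flatMap, List.nil_append, pvPyRange_one]
  simp only [List.flatMap_map]
  refine List.flatMap_congr fun k hk => ?_  -- pointwise equality of the two block builders
  have hk1 : 1 ≤ k := (List.mem_range'_1.mp hk).1
  have hks : k < size + 1 := by have := (List.mem_range'_1.mp hk).2; omega
  have hgetD : (pvApplyRuns (List.replicate (size + 1) 0) runs).getD k 0
      = (runs.count k : Int) := by
    rw [pvApplyRuns_getD runs (List.replicate (size + 1) 0) k
      (fun r hr => by simpa using Nat.lt_succ_of_le (hle r hr)) (by simpa using hks)]
    simp [hks]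
  simp only [PySem.List.pyGetD_natCast, hgetD, PySem.List.pyRepeat_singleton, Int.toNat_natCast]
  show (List.replicate ((runs.count k : Int)).toNat (List.replicate k c ++ [0])).flatten
      = (List.replicate (runs.count k) k).flatMap (fun r => List.replicate r c ++ [0])
  rw [Int.toNat_natCast]
  exact pvFlatten_replicate (fun r => List.replicate r c ++ [(0:Int)]) k (runs.count k)

-- ===== VERDICT (by name: the statement is the Claim_ definition above) =====
theorem transform_sort_complete_sequence_spec : Claim_equal_transform_sort_complete_sequence := by
  intro g _
  unfold Spec_transform_sort_complete_sequence
  unfold transform_sort_complete_sequence transform_sort_complete_sequence_alt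
  cases hf : g.find? (fun v => v ≠ 0) with
  | none => simp
  | some c =>
    have hc : c ≠ 0 := by
      have := List.find?_some hf
      simpa using this
    simp only [(pvHist_foldl c hc g).1 (List.replicate (g.length + 1) 0) 0, Nat.zero_add]
    split
    · rfl
    · rw [PySem.List.slice_to_natCast, pvEmit_eq]
      have hperm := PySem.List.sorted_perm (pvRunsA c g) (fun x => x) false
      have hpos : ∀ r ∈ PySem.List.sorted (pvRunsA c g) (fun x => x) false, 0 < r :=
        fun r hr => pvRunsA_pos c g r (hperm.mem_iff.mp hr)
      have hbound : (PySem.List.sorted (pvRunsA c g) (fun x => x) false).sum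
          + (PySem.List.sorted (pvRunsA c g) (fun x => x) false).length + 0 ≤ g.length + 1 := by
        rw [hperm.sum_eq, hperm.length_eq]
        simpa using pvRunsA_bound c g
      have := pvPlace_eq c g.length (PySem.List.sorted (pvRunsA c g) (fun x => x) false)
        [] 0 hpos hbound (Nat.zero_le _) rfl
      simpa using this
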